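/- GENERATED by tools/mkcompositions.py from design/units.gif.tsv (unit `DGifGetLine.COMPOSITION`) — do not edit.
   THE PROOF of the composition unit `DGifGetLine.COMPOSITION`: the 5 segments of `DGifGetLine` chain into its contract, by the theorem
   `Gif.Spec.DGifGetLine.compose` (proved next to the cut assertions). -/
import Gif.Spec.Units.DGifGetLine_COMPOSITION

/-- The segments of `DGifGetLine` compose into its contract. -/
theorem Gif.Spec.Proved.DGifGetLine_COMPOSITION_ok : Gif.Spec.DGifGetLine_COMPOSITION.Statement := by
  intro Lay _hLay μ _hμ u₀ h_DGifGetLine_P h_DGifGetLine_1 h_DGifGetLine_2 h_DGifGetLine_3 h_DGifGetLine_E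
  apply Gif.Spec.DGifGetLine.compose
  all_goals assumption
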